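-- pv_equiv track=rewrite | github.com/syd-kiwi/humor-harm-api | x_scraper.py | pick_mp4_variant
-- ===== SOURCE A (Python) =====
-- def pick_mp4_variant(variants):
--     if not variants:
--         return ""
--     mp4s = [v for v in variants if isinstance(v, dict) and v.get("content_type") == "video/mp4" and "url" in v]
--     if not mp4s:
--         return ""
--     # Prefer highest bitrate if present
--     mp4s.sort(key=lambda v: v.get("bit_rate", -1), reverse=True)
--     return mp4s[0]["url"]
-- ===== SOURCE B (Python) =====
-- def pick_mp4_variant(variants):
--     # Single pass: track the first best mp4 variant seen so far (strict '>' keeps the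
--     # earliest among equal bitrates, matching A's stable reverse sort).
--     best = None
--     for v in variants:
--         if isinstance(v, dict) and v.get("content_type") == "video/mp4" and "url" in v:
--             if best is None or best.get("bit_rate", -1) < v.get("bit_rate", -1):
--                 best = v
--     return best["url"] if best is not None else ""
-- ===== Notes on version B (the rewrite author's own statement) =====
-- stated objective: alternative
-- what changed: Replaces build-list-then-reverse-sort-then-take-head with a single running-best pass over the input (no intermediate list, no sort); strict comparison preserves A's first-of-ties choice.
import Mathlib
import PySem

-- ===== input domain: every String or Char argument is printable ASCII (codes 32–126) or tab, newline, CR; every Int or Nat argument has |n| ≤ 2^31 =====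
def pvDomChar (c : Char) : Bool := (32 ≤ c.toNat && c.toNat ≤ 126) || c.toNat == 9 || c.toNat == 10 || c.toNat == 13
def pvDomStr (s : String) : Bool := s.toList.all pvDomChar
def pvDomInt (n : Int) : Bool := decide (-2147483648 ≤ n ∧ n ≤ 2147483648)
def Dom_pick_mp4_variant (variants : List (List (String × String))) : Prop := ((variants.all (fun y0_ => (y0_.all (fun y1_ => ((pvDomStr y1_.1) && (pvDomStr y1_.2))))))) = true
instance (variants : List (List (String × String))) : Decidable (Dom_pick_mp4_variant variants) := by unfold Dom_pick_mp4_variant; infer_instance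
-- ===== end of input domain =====

-- B replaces A's filter + stable reverse sort + head with a single running-best pass
-- over the input (no sort, no intermediate list; same measured cost).


-- shared guard predicate of both Pythons: content_type == "video/mp4" and "url" in v
def pvIsMp4 (v : List (String × String)) : Bool :=
  (PySem.Dict.get? ⟨v⟩ "content_type" == some "video/mp4") && PySem.Dict.contains ⟨v⟩ "url"

-- the sort/compare key v.get("bit_rate", -1): under Pre_ the keys are homogeneous
-- (all present, or all absent, or a single candidate), so using "" as the default
-- is exact there: all-absent gives equal keys, where Python gives the equal keys -1.
def pvKey (v : List (String × String)) : String := PySem.Dict.getD ⟨v⟩ "bit_rate" ""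

-- ===== PORT A =====
def pick_mp4_variant (variants : List (List (String × String))) : String :=
  if variants = [] then ""
  else
    let mp4s := variants.filter pvIsMp4
    if mp4s = [] then ""
    else
      -- mp4s.sort(key=..., reverse=True); mp4s[0]["url"]
      let sortedL := PySem.List.sorted mp4s pvKey true
      -- pyGet? 0 and the "url" lookup never fail here (mp4s nonempty, url present): .getD "" is unreachable
      (((PySem.List.pyGet? sortedL 0).bind (fun h => PySem.Dict.get? ⟨h⟩ "url")).getD "")

-- ===== PORT B =====
def pick_mp4_variant_alt (variants : List (List (String × String))) : String :=
  let best := variants.foldl (fun best v =>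
    if pvIsMp4 v then
      match best with
      | none => some v
      | some b => if pvKey b < pvKey v then some v else some b
    else best) none
  match best with
  | none => ""
  | some b => PySem.Dict.getD ⟨b⟩ "url" ""

-- ===== PRECONDITION & SPEC =====
-- Pre_ excludes exactly the inputs on which A raises TypeError: two or more mp4
-- candidates of which some carry "bit_rate" and some do not (Python then compares
-- a str with the int -1 while sorting).
def Pre_pick_mp4_variant (variants : List (List (String × String))) : Prop :=
  (variants.filter pvIsMp4).length ≤ 1 ∨
  (∀ v ∈ variants.filter pvIsMp4, PySem.Dict.contains ⟨v⟩ "bit_rate" = true) ∨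
  (∀ v ∈ variants.filter pvIsMp4, PySem.Dict.contains ⟨v⟩ "bit_rate" = false)
instance (variants : List (List (String × String))) : Decidable (Pre_pick_mp4_variant variants) := by
  unfold Pre_pick_mp4_variant; infer_instance

def pvWitness_pick_mp4_variant : (List (List (String × String))) :=
  [[("content_type", "video/mp4"), ("url", "https://x/a.mp4"), ("bit_rate", "832000")],
   [("content_type", "video/mp4"), ("url", "https://x/b.mp4"), ("bit_rate", "950000")]]

def Spec_pick_mp4_variant (variants : List (List (String × String))) (out : String) : Prop := out = pick_mp4_variant_alt variants
instance (variants : List (List (String × String))) (out : String) : Decidable (Spec_pick_mp4_variant variants out) := by unfold Spec_pick_mp4_variant; infer_instance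

-- ===== CLAIM (what is proved, stated in full; the proofs are below) =====
def Claim_equal_pick_mp4_variant : Prop := ∀ (variants : List (List (String × String))), Dom_pick_mp4_variant variants → Pre_pick_mp4_variant variants → Spec_pick_mp4_variant variants (pick_mp4_variant variants)

-- ===== LEMMAS AND PROOFS =====

-- head of Python's insertion step: the new element takes the front iff it beats the old head
theorem head?_insertBy (f : List (String × String) → List (String × String) → Bool)
    (x : List (String × String)) (ys : List (List (String × String))) :
    (PySem.List.insertBy f x ys).head? =
      some (match ys.head? with | none => x | some h => if f x h then x else h) := by
  cases ys with
  | nil => simp [PySem.List.insertBy]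
  | cons h t =>
      by_cases hf : f x h = true <;>
        simp [PySem.List.insertBy, hf]

-- the head of the insertion-sort fold IS the running-best fold
theorem head?_foldl_insertBy (l : List (List (String × String)))
    (acc : List (List (String × String))) :
    (l.foldl (fun acc x =>
        PySem.List.insertBy (fun a b => decide (pvKey b < pvKey a)) x acc) acc).head? =
      l.foldl (fun best x =>
        match best with
        | none => some x
        | some b => if pvKey b < pvKey x then some x else some b) acc.head? := by
  induction l generalizing acc with
  | nil => rfl
  | cons x l ih =>
      simp only [List.foldl_cons]
      rw [ih]
      congr 1
      rw [head?_insertBy]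
      cases hys : acc.head? with
      | none => simp
      | some h => by_cases hlt : pvKey h < pvKey x <;> simp [hlt]

theorem bestfold_filter (variants : List (List (String × String))) :
    variants.foldl (fun best v =>
      if pvIsMp4 v then
        match best with
        | none => some v
        | some b => if pvKey b < pvKey v then some v else some b
      else best) none =
    (variants.filter pvIsMp4).foldl (fun best v =>
      match best with
      | none => some v
      | some b => if pvKey b < pvKey v then some v else some b) none :=
  PySem.List.foldl_if_eq_foldl_filter pvIsMp4
    (fun best v =>
      match best with
      | none => some v
      | some b => if pvKey b < pvKey v then some v else some b) variants none

-- ===== VERDICT (by name: the statement is the Claim_ definition above) =====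
theorem pick_mp4_variant_spec : Claim_equal_pick_mp4_variant := by
  intro variants _ _
  unfold Spec_pick_mp4_variant pick_mp4_variant pick_mp4_variant_alt
  rw [bestfold_filter]
  set mp4s := variants.filter pvIsMp4 with hmp4s
  by_cases hv : variants = []
  · subst hv
    simp at hmp4s
    simp [hmp4s]
  · simp only [if_neg hv]
    by_cases hm : mp4s = []
    · simp [hm]
    · simp only [if_neg hm]
      have hsort := PySem.List.sorted_rev_eq_foldl_insertBy mp4s pvKey
      have hhead := head?_foldl_insertBy mp4s []
      rw [← hsort] at hhead
      simp only [List.head?_nil] at hhead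
      rw [← hhead]
      have hne : PySem.List.sorted mp4s pvKey true ≠ [] := fun h =>
        hm ((PySem.List.sorted_eq_nil_iff _ _ _).mp h)
      cases hs : PySem.List.sorted mp4s pvKey true with
      | nil => exact absurd hs hne
      | cons h t =>
          -- h is an mp4 candidate, so "url" is a key of h
          have hmem : h ∈ mp4s := by
            have := PySem.List.sorted_perm mp4s pvKey true
            rw [hs] at this
            exact this.mem_iff.mp (by simp)
          have hmem2 := List.of_mem_filter (hmp4s ▸ hmem)
          simp [pvIsMp4] at hmem2
          obtain ⟨x, hx⟩ := hmem2.2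
          have hfind : (h.find? (fun p => p.1 == "url")).isSome :=
            List.find?_isSome.mpr ⟨("url", x), hx, by simp⟩
          obtain ⟨⟨k, u⟩, hu⟩ := Option.isSome_iff_exists.mp hfind
          simp [PySem.List.pyGet?, PySem.List.pyIdx?, PySem.Dict.getD, PySem.Dict.get?, hu]
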